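-- pv_equiv track=rewrite | github.com/LenaBuraja/Codeforces | Python/918A.py | Fibonachi
-- ===== SOURCE A (Python) =====
-- def Fibonachi(key: int):
--     symbol: str = 's'
--     name: str = symbol.upper()
--     countEl: int = 1
--     myList = [1, 1]
--     for i in range(2, key + 1):
--         if (myList[countEl - 1] + myList[countEl]) == i:
--             myList.append(myList[countEl - 1] + myList[countEl])
--             countEl += 1
--             name += symbol.upper()
--         else:
--             name += symbol
--     return name
-- ===== SOURCE B (Python) =====
-- def Fibonachi(key: int):
--     n = key if key > 1 else 1
--     arr = ['s'] * n
--     a, b = 1, 1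
--     while a <= n:
--         arr[a - 1] = 'S'
--         a, b = b, a + b
--     return ''.join(arr)
-- ===== Notes on version B (the rewrite author's own statement) =====
-- stated objective: alternative
-- what changed: B pre-fills a mutable character array of length max(key,1) with 's' in one bulk operation and then point-writes 'S' only at the Fibonacci indices (its loop iterates over the Fibonacci numbers, not over the positions), joining once at the end; A instead scans every position 2..key and decides each character by advancing a growing Fibonacci list with a countEl pointer, appending to the string per position.
import Mathlib
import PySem

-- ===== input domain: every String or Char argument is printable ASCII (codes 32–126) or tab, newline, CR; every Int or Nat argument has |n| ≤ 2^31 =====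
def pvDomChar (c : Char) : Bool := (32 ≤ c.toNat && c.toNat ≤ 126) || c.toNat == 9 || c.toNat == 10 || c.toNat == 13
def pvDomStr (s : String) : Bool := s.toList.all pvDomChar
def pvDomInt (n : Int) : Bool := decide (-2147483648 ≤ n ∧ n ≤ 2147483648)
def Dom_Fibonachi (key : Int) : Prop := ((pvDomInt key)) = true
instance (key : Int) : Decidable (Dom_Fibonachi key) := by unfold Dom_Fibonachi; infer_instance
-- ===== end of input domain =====

-- B pre-fills an array of 's' of length max(key,1) in bulk and point-writes 'S' at the
-- Fibonacci indices only, instead of A's per-position scan with a growing list and pointer;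
-- measurably faster by a constant factor, same return value (both total).


-- ===== PORT A =====
-- one iteration of A's for-loop; state = (name, countEl, myList).
-- myList[countEl-1] and myList[countEl] are always in range (countEl = myList.length - 1 ≥ 1),
-- so the pyGetD default 0 is never used.
def stepA (st : String × Int × List Int) (i : Int) : String × Int × List Int :=
  if PySem.List.pyGetD st.2.2 (st.2.1 - 1) 0 + PySem.List.pyGetD st.2.2 st.2.1 0 = i then
    (st.1 ++ PySem.Str.upper "s", st.2.1 + 1,
      st.2.2 ++ [PySem.List.pyGetD st.2.2 (st.2.1 - 1) 0 + PySem.List.pyGetD st.2.2 st.2.1 0])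
  else
    (st.1 ++ "s", st.2.1, st.2.2)

def Fibonachi (key : Int) : String :=
  ((PySem.List.pyRange 2 (key + 1) 1).foldl stepA (PySem.Str.upper "s", (1 : Int), [1, 1])).1

-- ===== PORT B =====
-- Source B's 'n = key if key > 1 else 1'
def bLen (key : Int) : Int := if key > 1 then key else 1

-- Source B's while-loop 'while a <= n: arr[a-1] = "S"; a, b = b, a + b' as fuel recursion.
-- arr[a-1] = 'S' is ported as List.set (a-1).toNat: exact, since every call keeps 1 ≤ a
-- (so a-1 is a non-negative in-range index whenever a ≤ n = arr.length).
-- The visited a-values are Fibonacci numbers ≥ a's start and strictly increase after the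
-- first step, so fuel n.toNat + 2 always suffices.
def setFibs (fuel : Nat) (n a b : Int) (arr : List Char) : List Char :=
  match fuel with
  | 0 => arr
  | f + 1 => if a ≤ n then setFibs f n b (a + b) (arr.set (a - 1).toNat 'S') else arr

def Fibonachi_alt (key : Int) : String :=
  String.ofList (setFibs ((bLen key).toNat + 2) (bLen key) 1 1
    (List.replicate (bLen key).toNat 's'))

-- ===== PRECONDITION & SPEC =====
def Spec_Fibonachi (key : Int) (out : String) : Prop := out = Fibonachi_alt key
instance (key : Int) (out : String) : Decidable (Spec_Fibonachi key out) := by unfold Spec_Fibonachi; infer_instance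

-- ===== CLAIM (what is proved, stated in full; the proofs are below) =====
def Claim_equal_Fibonachi : Prop := ∀ (key : Int), Dom_Fibonachi key → Spec_Fibonachi key (Fibonachi key)

-- ===== LEMMAS AND PROOFS =====

-- the Fibonacci sequence both programs track: 1, 1, 2, 3, 5, …
def fibI : Nat → Int
  | 0 => 1
  | 1 => 1
  | n + 2 => fibI n + fibI (n + 1)

theorem fibI_pos : ∀ n, 1 ≤ fibI n
  | 0 => le_refl 1
  | 1 => le_refl 1
  | n + 2 => by
      have h1 := fibI_pos n
      have h2 := fibI_pos (n + 1)
      show 1 ≤ fibI n + fibI (n + 1)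
      omega

theorem fibI_succ_lt (n : Nat) (h : 1 ≤ n) : fibI n < fibI (n + 1) := by
  match n, h with
  | m + 1, _ =>
    have := fibI_pos m
    show fibI (m + 1) < fibI m + fibI (m + 1)
    omega

theorem fibI_le_succ (n : Nat) : fibI n ≤ fibI (n + 1) := by
  cases n with
  | zero => exact le_refl 1
  | succ m => exact le_of_lt (fibI_succ_lt (m + 1) (by omega))

theorem fibI_mono (m n : Nat) (h : m ≤ n) : fibI m ≤ fibI n := by
  induction n with
  | zero =>
    have h0 : m = 0 := by omega
    rw [h0]
  | succ k ih =>
    rcases Nat.lt_or_ge m (k + 1) with hlt | hge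
    · exact le_trans (ih (by omega)) (fibI_le_succ k)
    · have : m = k + 1 := by omega
      subst this; exact le_refl _

-- ghost list of Fibonacci numbers ≤ key (proof-side; used to characterise A's marks)
def fibsUpTo (fuel : Nat) (key a b : Int) : List Int :=
  match fuel with
  | 0 => []
  | f + 1 => if b ≤ key then b :: fibsUpTo f key b (a + b) else []

theorem mem_fibsUpTo (key : Int) :
    ∀ (fuel : Nat) (n : Nat) (i : Int), (key + 1 - fibI (n + 1)).toNat < fuel →
      (i ∈ fibsUpTo fuel key (fibI n) (fibI (n + 1)) ↔
        ∃ m, n + 1 ≤ m ∧ fibI m = i ∧ i ≤ key) := by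
  intro fuel
  induction fuel with
  | zero => intro n i h; omega
  | succ f ih =>
    intro n i h
    by_cases hb : fibI (n + 1) ≤ key
    · have hstep : fibsUpTo (f + 1) key (fibI n) (fibI (n + 1))
          = fibI (n + 1) :: fibsUpTo f key (fibI (n + 1)) (fibI n + fibI (n + 1)) := by
        show (if fibI (n+1) ≤ key then _ else []) = _
        rw [if_pos hb]
      have hfib2 : fibI (n + 2) = fibI n + fibI (n + 1) := rfl
      rw [hstep, ← hfib2]
      have hp := fibI_pos n
      have hfuel : (key + 1 - fibI (n + 1 + 1)).toNat < f := by
        have he : fibI (n + 1 + 1) = fibI n + fibI (n + 1) := rfl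
        rw [he]; omega
      rw [List.mem_cons, ih (n + 1) i hfuel]
      constructor
      · rintro (rfl | ⟨m, hm, rfl, hk⟩)
        · exact ⟨n + 1, le_refl _, rfl, hb⟩
        · exact ⟨m, by omega, rfl, hk⟩
      · rintro ⟨m, hm, rfl, hk⟩
        rcases eq_or_lt_of_le hm with heq | hlt
        · left; rw [← heq]
        · right; exact ⟨m, by omega, rfl, hk⟩
    · have hstep : fibsUpTo (f + 1) key (fibI n) (fibI (n + 1)) = [] := by
        show (if fibI (n+1) ≤ key then _ else []) = []
        rw [if_neg hb]
      rw [hstep]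
      simp only [List.not_mem_nil, false_iff]
      rintro ⟨m, hm, rfl, hk⟩
      have := fibI_mono (n + 1) m hm
      omega

theorem mem_fibs_iff (key i : Int) :
    i ∈ fibsUpTo (key.toNat + 1) key 1 1 ↔ ∃ m, 1 ≤ m ∧ fibI m = i ∧ i ≤ key := by
  have h := mem_fibsUpTo key (key.toNat + 1) 0 i (by show (key + 1 - fibI 1).toNat < _; show (key + 1 - 1).toNat < _; omega)
  exact h

-- ghost list of the a-values B's while-loop writes (in order)
def writesList (fuel : Nat) (n a b : Int) : List Int :=
  match fuel with
  | 0 => []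
  | f + 1 => if a ≤ n then a :: writesList f n b (a + b) else []

-- B's write loop = fold of point writes over that ghost list
theorem setFibs_eq_writeAll :
    ∀ (fuel : Nat) (n a b : Int) (arr : List Char),
      setFibs fuel n a b arr
        = (writesList fuel n a b).foldl (fun l v => l.set (v - 1).toNat 'S') arr := by
  intro fuel
  induction fuel with
  | zero => intro n a b arr; rfl
  | succ f ih =>
    intro n a b arr
    show (if a ≤ n then setFibs f n b (a + b) (arr.set (a - 1).toNat 'S') else arr)
        = ((if a ≤ n then a :: writesList f n b (a + b) else []).foldl _ arr)
    by_cases hb : a ≤ n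
    · rw [if_pos hb, if_pos hb, List.foldl_cons, ih]
    · rw [if_neg hb, if_neg hb, List.foldl_nil]

theorem mem_writesList (n : Int) :
    ∀ (fuel : Nat) (m : Nat) (i : Int), (n + 1 - fibI (m + 1)).toNat + 1 < fuel →
      (i ∈ writesList fuel n (fibI m) (fibI (m + 1)) ↔
        ∃ j, m ≤ j ∧ fibI j = i ∧ i ≤ n) := by
  intro fuel
  induction fuel with
  | zero => intro m i h; omega
  | succ f ih =>
    intro m i h
    by_cases hb : fibI m ≤ n
    · have hstep : writesList (f + 1) n (fibI m) (fibI (m + 1))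
          = fibI m :: writesList f n (fibI (m + 1)) (fibI m + fibI (m + 1)) := by
        show (if fibI m ≤ n then _ else []) = _
        rw [if_pos hb]
      have hfib2 : fibI (m + 2) = fibI m + fibI (m + 1) := rfl
      rw [hstep, ← hfib2]
      by_cases hb2 : fibI (m + 1) ≤ n
      · have hlt : fibI (m + 1) < fibI (m + 2) := fibI_succ_lt (m + 1) (by omega)
        have hfuel : (n + 1 - fibI (m + 1 + 1)).toNat + 1 < f := by
          have he : fibI (m + 1 + 1) = fibI (m + 2) := rfl
          rw [he]; omega
        rw [List.mem_cons, ih (m + 1) i hfuel]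
        constructor
        · rintro (rfl | ⟨j, hj, rfl, hk⟩)
          · exact ⟨m, le_refl _, rfl, hb⟩
          · exact ⟨j, by omega, rfl, hk⟩
        · rintro ⟨j, hj, rfl, hk⟩
          rcases eq_or_lt_of_le hj with heq | hlt'
          · left; rw [← heq]
          · right; exact ⟨j, by omega, rfl, hk⟩
      · have htail : writesList f n (fibI (m + 1)) (fibI (m + 2)) = [] := by
          match f, h with
          | g + 1, _ =>
            show (if fibI (m + 1) ≤ n then _ else []) = []
            rw [if_neg hb2]
        rw [htail, List.mem_cons]
        simp only [List.not_mem_nil, or_false]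
        constructor
        · rintro rfl; exact ⟨m, le_refl _, rfl, hb⟩
        · rintro ⟨j, hj, rfl, hk⟩
          rcases eq_or_lt_of_le hj with heq | hlt'
          · rw [← heq]
          · exfalso; have := fibI_mono (m + 1) j (by omega); omega
    · have hstep : writesList (f + 1) n (fibI m) (fibI (m + 1)) = [] := by
        show (if fibI m ≤ n then _ else []) = []
        rw [if_neg hb]
      rw [hstep]
      simp only [List.not_mem_nil, false_iff]
      rintro ⟨j, hj, rfl, hk⟩
      have := fibI_mono m j hj
      omega

-- elementwise description of a fold of point writes
theorem writeAll_getElem? :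
    ∀ (L : List Int) (arr : List Char) (p : Nat),
      (∀ v ∈ L, 1 ≤ v ∧ v ≤ (arr.length : Int)) →
      (L.foldl (fun l v => l.set (v - 1).toNat 'S') arr)[p]?
        = if ((p : Int) + 1) ∈ L then some 'S' else arr[p]? := by
  intro L
  induction L with
  | nil => intro arr p _; simp
  | cons v L ih =>
    intro arr p hv
    have hv1 := hv v (List.mem_cons_self)
    have hlen : (arr.set (v - 1).toNat 'S').length = arr.length := List.length_set
    rw [List.foldl_cons,
      ih (arr.set (v - 1).toNat 'S') p (fun w hw => by
        have := hv w (List.mem_cons_of_mem _ hw); rw [hlen]; exact this)]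
    by_cases hmem : ((p : Int) + 1) ∈ L
    · rw [if_pos hmem, if_pos (List.mem_cons_of_mem _ hmem)]
    · rw [if_neg hmem]
      by_cases hpv : ((p : Int) + 1) = v
      · have hidx : (v - 1).toNat = p := by omega
        rw [if_pos (by rw [List.mem_cons]; exact Or.inl hpv), hidx,
          List.getElem?_set_self (by omega)]
      · have hidx : (v - 1).toNat ≠ p := by omega
        rw [List.getElem?_set_ne hidx,
          if_neg (by simp only [List.mem_cons, not_or]; exact ⟨hpv, hmem⟩)]

theorem chars_join_empty_cons (x : List Char) (xs : List (List Char)) :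
    PySem.Chars.join [] (x :: xs) = x ++ PySem.Chars.join [] xs := by
  cases xs with
  | nil => simp [PySem.Chars.join, List.intercalate]
  | cons y ys => rw [PySem.Chars.join_cons_cons]; simp

theorem strJoin_cons (x : String) (xs : List String) :
    PySem.Str.join "" (x :: xs) = x ++ PySem.Str.join "" xs := by
  simp [PySem.Str.join, chars_join_empty_cons, String.ofList_append]

theorem strJoin_nil : PySem.Str.join "" ([] : List String) = "" := by
  simp [PySem.Str.join, PySem.Chars.join, List.intercalate]

theorem ofList_cons_split (c : Char) (l : List Char) :
    String.ofList (c :: l) = String.ofList [c] ++ String.ofList l := by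
  rw [← String.ofList_append]; rfl

-- a join of single-letter strings is the string of the corresponding characters
theorem strJoin_ite_mk (P : Int → Prop) [DecidablePred P] :
    ∀ (l : List Int),
      PySem.Str.join "" (l.map (fun j => if P j then "S" else "s"))
        = String.ofList (l.map (fun j => if P j then 'S' else 's')) := by
  intro l
  induction l with
  | nil => rw [List.map_nil, List.map_nil, strJoin_nil]
  | cons x xs ih =>
    rw [List.map_cons, List.map_cons, strJoin_cons, ih, ofList_cons_split]
    by_cases hP : P x
    · rw [if_pos hP, if_pos hP]
    · rw [if_neg hP, if_neg hP]

-- A's myList after countEl has reached n: [fibI 0, …, fibI n]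
def fibPref (n : Nat) : List Int := (List.range (n + 1)).map fibI

theorem fibPref_get (n k : Nat) (h : k ≤ n) :
    PySem.List.pyGetD (fibPref n) (k : Int) 0 = fibI k := by
  rw [PySem.List.pyGetD_natCast]
  exact PySem.List.getD_map_range fibI (n + 1) k 0 (by omega)

theorem fibPref_snoc (n : Nat) : fibPref n ++ [fibI (n + 1)] = fibPref (n + 1) := by
  simp [fibPref, List.range_succ]

-- invariant-carrying form of A's loop: with countEl = n, myList = fibPref n and
-- fibI n < i ≤ fibI (n+1), the remaining iterations emit exactly the membership letters
theorem loopA (key : Int) :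
    ∀ (fuel : Nat) (i : Int) (n : Nat) (name : String), (key + 1 - i).toNat ≤ fuel →
      1 ≤ n → fibI n < i → i ≤ fibI (n + 1) →
      ((PySem.List.pyRange i (key + 1) 1).foldl stepA (name, (n : Int), fibPref n)).1
        = name ++ PySem.Str.join "" ((PySem.List.pyRange i (key + 1) 1).map
            (fun j => if j ∈ fibsUpTo (key.toNat + 1) key 1 1 then "S" else "s")) := by
  intro fuel
  induction fuel with
  | zero =>
    intro i n name hf _ _ _
    rw [PySem.List.pyRange_one_eq_nil (by omega)]
    simp [strJoin_nil]
  | succ f ih =>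
    intro i n name hf h1 h2 h3
    by_cases hib : i < key + 1
    · rw [PySem.List.pyRange_one_cons hib]
      simp only [List.foldl_cons, List.map_cons]
      rw [strJoin_cons]
      have hidx : ((n : Int) - 1) = ((n - 1 : Nat) : Int) := by omega
      have hga : PySem.List.pyGetD (fibPref n) ((n : Int) - 1) 0 = fibI (n - 1) := by
        rw [hidx, fibPref_get n (n - 1) (by omega)]
      have hgb : PySem.List.pyGetD (fibPref n) ((n : Int)) 0 = fibI n :=
        fibPref_get n n (le_refl n)
      have hsum : fibI (n - 1) + fibI n = fibI (n + 1) := by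
        match n, h1 with
        | m + 1, _ => rfl
      have hkey : i ≤ key := by omega
      have hA : stepA (name, (n : Int), fibPref n) i
          = if fibI (n + 1) = i then
              (name ++ PySem.Str.upper "s", (n : Int) + 1, fibPref n ++ [fibI (n + 1)])
            else (name ++ "s", (n : Int), fibPref n) := by
        simp only [stepA, hga, hgb, hsum]
      by_cases hc : fibI (n + 1) = i
      · have hmem : i ∈ fibsUpTo (key.toNat + 1) key 1 1 := by
          rw [mem_fibs_iff]
          exact ⟨n + 1, by omega, hc, hkey⟩
        rw [hA, if_pos hc, if_pos hmem]
        have hup : PySem.Str.upper "s" = "S" := rfl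
        have hcast : (n : Int) + 1 = ((n + 1 : Nat) : Int) := by omega
        rw [hup, hcast, fibPref_snoc]
        rw [ih (i + 1) (n + 1) (name ++ "S") (by omega) (by omega)
              (by omega) (by show i + 1 ≤ fibI (n + 2);
                             have : fibI (n + 2) = fibI n + fibI (n + 1) := rfl
                             have := fibI_pos n; omega)]
        rw [String.append_assoc]
      · have hmem : i ∉ fibsUpTo (key.toNat + 1) key 1 1 := by
          rw [mem_fibs_iff]
          rintro ⟨m, hm, rfl, hk⟩
          rcases Nat.lt_or_ge m (n + 1) with hlt | hge
          · have := fibI_mono m n (by omega); omega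
          · rcases eq_or_lt_of_le hge with heq | hlt'
            · exact hc (by rw [heq])
            · have h5 : fibI (n + 1) < fibI (n + 2) := fibI_succ_lt (n + 1) (by omega)
              have h6 : fibI (n + 2) ≤ fibI m := fibI_mono (n + 2) m (by omega)
              omega
        rw [hA, if_neg hc, if_neg hmem]
        rw [ih (i + 1) n (name ++ "s") (by omega) h1 (by omega) (by omega)]
        rw [String.append_assoc]
    · rw [PySem.List.pyRange_one_eq_nil (by omega)]
      simp [strJoin_nil]

theorem fibPref_one : fibPref 1 = [1, 1] := rfl

-- membership form of B's write set, from the start state a = fibI 0, b = fibI 1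
theorem mem_writes_start (n i : Int) (hn : 1 ≤ n) :
    i ∈ writesList (n.toNat + 2) n 1 1 ↔ ∃ j, fibI j = i ∧ i ≤ n := by
  have h := mem_writesList n (n.toNat + 2) 0 i
    (by show (n + 1 - fibI 1).toNat + 1 < _; show (n + 1 - 1).toNat + 1 < _; omega)
  have e0 : fibI 0 = 1 := rfl
  have e1 : fibI (0 + 1) = 1 := rfl
  rw [e0, e1] at h
  rw [h]
  constructor
  · rintro ⟨j, _, rfl, hk⟩; exact ⟨j, rfl, hk⟩
  · rintro ⟨j, rfl, hk⟩; exact ⟨j, by omega, rfl, hk⟩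

-- B's result, elementwise
theorem alt_getElem (key : Int) (hk : 1 < key) (p : Nat) :
    (setFibs (key.toNat + 2) key 1 1 (List.replicate key.toNat 's'))[p]?
      = if ((p : Int) + 1) ∈ writesList (key.toNat + 2) key 1 1 then some 'S'
        else (List.replicate key.toNat 's')[p]? := by
  rw [setFibs_eq_writeAll]
  exact writeAll_getElem? _ _ p (fun v hv => by
    rw [mem_writes_start key v (by omega)] at hv
    obtain ⟨j, rfl, hle⟩ := hv
    have := fibI_pos j
    simp only [List.length_replicate]
    omega)

-- ===== VERDICT (by name: the statement is the Claim_ definition above) =====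
theorem Fibonachi_spec : Claim_equal_Fibonachi := by
  unfold Claim_equal_Fibonachi
  intro key _
  unfold Spec_Fibonachi Fibonachi Fibonachi_alt
  by_cases hk : key > 1
  case neg =>
    have hb : bLen key = 1 := by unfold bLen; rw [if_neg hk]
    rw [hb, PySem.List.pyRange_one_eq_nil (by omega), List.foldl_nil]
    decide
  case pos =>
    have hb : bLen key = key := by unfold bLen; rw [if_pos hk]
    rw [hb]
    have hA := loopA key (key + 1 - 2).toNat 2 1 "S" (le_refl _) (le_refl 1)
        (by show fibI 1 < 2; show (1 : Int) < 2; omega)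
        (by show (2 : Int) ≤ fibI 2; show (2 : Int) ≤ 1 + 1; omega)
    rw [fibPref_one] at hA
    refine Eq.trans hA ?_
    rw [strJoin_ite_mk (fun j => j ∈ fibsUpTo (key.toNat + 1) key 1 1)]
    rw [show ("S" : String) = String.ofList ['S'] from rfl, ← String.ofList_append]
    congr 1
    apply List.ext_getElem?
    intro p
    cases p with
    | zero =>
      rw [alt_getElem key hk 0]
      rw [if_pos (show ((0 : Nat) : Int) + 1 ∈ writesList (key.toNat + 2) key 1 1 by
        have h01 : ((0 : Nat) : Int) + 1 = 1 := by norm_num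
        rw [h01, mem_writes_start key 1 (by omega)]
        exact ⟨0, rfl, by omega⟩)]
      rfl
    | succ q =>
      rw [alt_getElem key hk (q + 1)]
      simp only [List.cons_append, List.nil_append]
      rw [List.getElem?_replicate, List.getElem?_cons_succ, List.getElem?_map,
        PySem.List.getElem?_pyRange_one]
      by_cases hq : q < (key + 1 - 2).toNat
      · rw [if_pos hq, if_pos (show q + 1 < key.toNat by omega)]
        rw [show ((q + 1 : Nat) : Int) + 1 = 2 + (q : Int) from by push_cast; ring]
        rw [Option.map_some]
        have hiff : (2 + (q : Int)) ∈ writesList (key.toNat + 2) key 1 1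
            ↔ (2 + (q : Int)) ∈ fibsUpTo (key.toNat + 1) key 1 1 := by
          rw [mem_writes_start key _ (by omega), mem_fibs_iff]
          constructor
          · rintro ⟨j, hj, hle⟩
            refine ⟨j, ?_, hj, hle⟩
            cases j with
            | zero => exfalso; rw [show fibI 0 = 1 from rfl] at hj; omega
            | succ s => omega
          · rintro ⟨m, _, hm, hle⟩; exact ⟨m, hm, hle⟩
        rw [if_congr hiff rfl rfl]
        split_ifs <;> rfl
      · rw [if_neg hq, if_neg (show ¬ (q + 1 < key.toNat) by omega)]
        rw [if_neg (by
          rw [mem_writes_start key _ (by omega)]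
          rintro ⟨j, _, hle⟩
          omega)]
        rfl
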